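-- pv_equiv track=rewrite | github.com/suoweikeji-liqiang/-wasc-grounded-search-skill | skill/evidence/academic.py | _group_key_type
-- ===== SOURCE A (Python) =====
-- def _group_key_type(aliases: set[tuple[str, ...]]) -> str:
--     if any(alias[0] == "doi" for alias in aliases):
--         return "doi"
--     if any(alias[0] == "arxiv" for alias in aliases):
--         return "arxiv"
--     if any(alias[0] == "heuristic" for alias in aliases):
--         return "heuristic"
--     return "source"
-- ===== SOURCE B (Python) =====
-- def _group_key_type(aliases: set[tuple[str, ...]]) -> str:
--     rank = {"doi": 0, "arxiv": 1, "heuristic": 2}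
--     best = 3
--     for alias in aliases:
--         best = min(best, rank.get(alias[0], 3))
--     return ("doi", "arxiv", "heuristic", "source")[best]
-- ===== Notes on version B (the rewrite author's own statement) =====
-- stated objective: alternative
-- what changed: Replaces three priority-ordered any-scans with a single pass that accumulates the minimum priority rank via a dict, then indexes a tuple of names by the best rank.
-- outside the precondition, e.g. on _group_key_type({(), ('doi',)}): A returns 'doi', B raises IndexError
import Mathlib
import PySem

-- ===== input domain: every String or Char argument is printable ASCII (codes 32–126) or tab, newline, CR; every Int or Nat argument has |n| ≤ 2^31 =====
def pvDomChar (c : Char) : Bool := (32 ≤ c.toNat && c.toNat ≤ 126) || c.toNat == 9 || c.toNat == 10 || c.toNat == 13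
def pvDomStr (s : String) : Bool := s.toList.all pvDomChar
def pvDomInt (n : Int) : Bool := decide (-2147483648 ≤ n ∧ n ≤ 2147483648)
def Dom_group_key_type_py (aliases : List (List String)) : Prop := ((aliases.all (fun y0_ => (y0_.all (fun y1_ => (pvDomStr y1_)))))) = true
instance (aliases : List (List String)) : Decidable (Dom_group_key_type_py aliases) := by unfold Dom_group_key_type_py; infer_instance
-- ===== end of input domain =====

-- B replaces A's three priority-ordered any-scans by a single min-rank accumulating pass (alternative decomposition, same cost).

-- ===== PORT A =====
-- alias[0] == s, with alias[0] ported as pyGet? (none = IndexError, excluded by Pre_)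
def pvFirstIs (s : String) (al : List String) : Bool :=
  PySem.List.pyGet? al 0 == some s

def group_key_type_py (aliases : List (List String)) : String :=
  if aliases.any (pvFirstIs "doi") then "doi"
  else if aliases.any (pvFirstIs "arxiv") then "arxiv"
  else if aliases.any (pvFirstIs "heuristic") then "heuristic"
  else "source"

-- ===== PORT B =====
-- rank = {"doi": 0, "arxiv": 1, "heuristic": 2}
def pvRankDict : PySem.Dict String Nat :=
  PySem.Dict.ofList [("doi", 0), ("arxiv", 1), ("heuristic", 2)]

-- rank.get(alias[0], 3); alias[0] ported as pyGetD (exact under Pre_: alias ≠ [])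
def pvRankOf (al : List String) : Nat :=
  PySem.Dict.getD pvRankDict (PySem.List.pyGetD al 0 "") 3

def group_key_type_py_alt (aliases : List (List String)) : String :=
  let best := aliases.foldl (fun best al => min best (pvRankOf al)) 3
  ["doi", "arxiv", "heuristic", "source"].getD best "source"

-- ===== PRECONDITION & SPEC =====
-- Pre_ excludes inputs containing an empty alias tuple: there alias[0] raises IndexError
-- (B always raises; A raises too unless a higher-priority alias was scanned first and any() short-circuited).
def Pre_group_key_type_py (aliases : List (List String)) : Prop :=
  ∀ a ∈ aliases, a ≠ []
instance (aliases : List (List String)) : Decidable (Pre_group_key_type_py aliases) := by unfold Pre_group_key_type_py; infer_instance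

def pvWitness_group_key_type_py : List (List String) := [["arxiv", "1234"], ["url", "x"]]

def Spec_group_key_type_py (aliases : List (List String)) (out : String) : Prop := out = group_key_type_py_alt aliases
instance (aliases : List (List String)) (out : String) : Decidable (Spec_group_key_type_py aliases out) := by unfold Spec_group_key_type_py; infer_instance

-- ===== CLAIM (what is proved, stated in full; the proofs are below) =====
def Claim_equal_group_key_type_py : Prop := ∀ (aliases : List (List String)), Dom_group_key_type_py aliases → Pre_group_key_type_py aliases → Spec_group_key_type_py aliases (group_key_type_py aliases)

-- ===== LEMMAS AND PROOFS =====

-- rank of a nonempty alias, by its head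
theorem pvRankOf_cons (x : String) (t : List String) :
    pvRankOf (x :: t) =
      if x = "doi" then 0 else if x = "arxiv" then 1 else if x = "heuristic" then 2 else 3 := by
  have hd : pvRankDict = PySem.Dict.mk [("doi", 0), ("arxiv", 1), ("heuristic", 2)] := by decide
  simp [pvRankOf, hd, PySem.Dict.getD, PySem.Dict.get?_mk_cons,
        PySem.List.pyGetD, PySem.List.pyGet?, PySem.List.pyIdx?]
  clear hd
  split_ifs with h1 h2 h3 <;> subst_vars <;> simp_all [PySem.Dict.get?]

theorem pvFirstIs_cons (s x : String) (t : List String) :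
    pvFirstIs s (x :: t) = (x == s) := by
  simp [pvFirstIs, PySem.List.pyGet?, PySem.List.pyIdx?]

-- the fold's value is ≤ k iff the accumulator is or some alias has rank ≤ k
theorem pvFold_le (l : List (List String)) (r k : Nat) :
    (l.foldl (fun best al => min best (pvRankOf al)) r ≤ k) ↔
      (r ≤ k ∨ ∃ a ∈ l, pvRankOf a ≤ k) := by
  induction l generalizing r with
  | nil => simp
  | cons a l ih =>
    simp only [List.foldl_cons, ih, min_le_iff, List.mem_cons]
    constructor
    · rintro ((h | h) | ⟨b, hb, hbk⟩)
      · exact Or.inl h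
      · exact Or.inr ⟨a, Or.inl rfl, h⟩
      · exact Or.inr ⟨b, Or.inr hb, hbk⟩
    · rintro (h | ⟨b, rfl | hb, hbk⟩)
      · exact Or.inl (Or.inl h)
      · exact Or.inl (Or.inr hbk)
      · exact Or.inr ⟨b, hb, hbk⟩

theorem group_key_type_py_spec : Claim_equal_group_key_type_py := by
  intro aliases _ hpre
  unfold Spec_group_key_type_py group_key_type_py group_key_type_py_alt
  have hhead : ∀ a ∈ aliases, ∃ x t, a = x :: t := by
    intro a ha
    cases a with
    | nil => exact absurd rfl (hpre _ ha)
    | cons x t => exact ⟨x, t, rfl⟩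
  have hany : ∀ s : String, aliases.any (pvFirstIs s) = true ↔ ∃ a ∈ aliases, ∃ t, a = s :: t := by
    intro s
    simp only [List.any_eq_true]
    constructor
    · rintro ⟨a, ha, hs⟩
      obtain ⟨x, t, rfl⟩ := hhead a ha
      rw [pvFirstIs_cons] at hs
      exact ⟨x :: t, ha, t, by simp_all⟩
    · rintro ⟨a, ha, t, rfl⟩
      exact ⟨s :: t, ha, by rw [pvFirstIs_cons]; simp⟩
  by_cases hdoi : aliases.any (pvFirstIs "doi") = true
  · have hb : aliases.foldl (fun best al => min best (pvRankOf al)) 3 = 0 := by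
      have := (pvFold_le aliases 3 0).mpr
        (Or.inr (by
          obtain ⟨a, ha, t, rfl⟩ := (hany "doi").1 hdoi
          exact ⟨_, ha, by rw [pvRankOf_cons]; simp⟩))
      omega
    simp only [hdoi, if_true, hb]
    rfl
  · by_cases harx : aliases.any (pvFirstIs "arxiv") = true
    · have hle : aliases.foldl (fun best al => min best (pvRankOf al)) 3 ≤ 1 :=
        (pvFold_le aliases 3 1).mpr
          (Or.inr (by
            obtain ⟨a, ha, t, rfl⟩ := (hany "arxiv").1 harx
            exact ⟨_, ha, by rw [pvRankOf_cons]; simp⟩))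
      have hnot : ¬ aliases.foldl (fun best al => min best (pvRankOf al)) 3 ≤ 0 := by
        rw [pvFold_le]
        rintro (h | ⟨a, ha, hk⟩)
        · omega
        · obtain ⟨x, t, rfl⟩ := hhead a ha
          rw [pvRankOf_cons] at hk
          split_ifs at hk with e1 e2 e3
          · exact hdoi ((hany "doi").2 ⟨_, ha, t, by rw [e1]⟩)
          all_goals omega
      have hb : aliases.foldl (fun best al => min best (pvRankOf al)) 3 = 1 := by omega
      simp only [hdoi, harx, if_true, hb]
      rfl
    · by_cases hheu : aliases.any (pvFirstIs "heuristic") = true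
      · have hle : aliases.foldl (fun best al => min best (pvRankOf al)) 3 ≤ 2 :=
          (pvFold_le aliases 3 2).mpr
            (Or.inr (by
              obtain ⟨a, ha, t, rfl⟩ := (hany "heuristic").1 hheu
              exact ⟨_, ha, by rw [pvRankOf_cons]; simp⟩))
        have hnot : ¬ aliases.foldl (fun best al => min best (pvRankOf al)) 3 ≤ 1 := by
          rw [pvFold_le]
          rintro (h | ⟨a, ha, hk⟩)
          · omega
          · obtain ⟨x, t, rfl⟩ := hhead a ha
            rw [pvRankOf_cons] at hk
            split_ifs at hk with e1 e2 e3
            · exact hdoi ((hany "doi").2 ⟨_, ha, t, by rw [e1]⟩)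
            · exact harx ((hany "arxiv").2 ⟨_, ha, t, by rw [e2]⟩)
            all_goals omega
        have hb : aliases.foldl (fun best al => min best (pvRankOf al)) 3 = 2 := by omega
        simp only [hdoi, harx, hheu, if_true, hb]
        rfl
      · have hnot : ¬ aliases.foldl (fun best al => min best (pvRankOf al)) 3 ≤ 2 := by
          rw [pvFold_le]
          rintro (h | ⟨a, ha, hk⟩)
          · omega
          · obtain ⟨x, t, rfl⟩ := hhead a ha
            rw [pvRankOf_cons] at hk
            split_ifs at hk with e1 e2 e3
            · exact hdoi ((hany "doi").2 ⟨_, ha, t, by rw [e1]⟩)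
            · exact harx ((hany "arxiv").2 ⟨_, ha, t, by rw [e2]⟩)
            · exact hheu ((hany "heuristic").2 ⟨_, ha, t, by rw [e3]⟩)
            · omega
        have hle : aliases.foldl (fun best al => min best (pvRankOf al)) 3 ≤ 3 :=
          (pvFold_le aliases 3 3).mpr (Or.inl le_rfl)
        have hb : aliases.foldl (fun best al => min best (pvRankOf al)) 3 = 3 := by omega
        simp only [hdoi, harx, hheu, hb]
        rfl
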